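-- pv_equiv track=rewrite | github.com/VaHiX/CodeForces | Python/ByTier/B/1999_B_Card_Game.py | count_suneet_wins
-- ===== SOURCE A (Python) =====
-- def count_suneet_wins(a1, a2, b1, b2):
--     suneet_wins = 0
--     # Iterate through all possible first card choices for Suneet
--     for s1, s2 in [(a1, a2), (a2, a1)]:
--         # Iterate through all possible first card choices for Slavic
--         for sl1, sl2 in [(b1, b2), (b2, b1)]:
--             suneet_rounds_won = 0
--             slavic_rounds_won = 0
--             # First round: compare Suneet's first card with Slavic's first card
--             if s1 > sl1:
--                 suneet_rounds_won += 1
--             elif s1 < sl1: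
--                 slavic_rounds_won += 1
--             # Second round: compare Suneet's second card with Slavic's second card
--             if s2 > sl2:
--                 suneet_rounds_won += 1
--             elif s2 < sl2:
--                 slavic_rounds_won += 1
--             # If Suneet won more rounds than Slavic, increment the win count
--             if suneet_rounds_won > slavic_rounds_won:
--                 suneet_wins += 1
--     return suneet_wins
-- ===== SOURCE B (Python) =====
-- def count_suneet_wins(a1, a2, b1, b2):
--     # Only two distinct pairings exist; each covers two of the four scenarios.
--     def pairing_win(x1, y1, x2, y2):
--         return int((x1 > y1) + (x2 > y2) > (x1 < y1) + (x2 < y2))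
--     return 2 * pairing_win(a1, b1, a2, b2) + 2 * pairing_win(a1, b2, a2, b1)
-- ===== Notes on version B (the rewrite author's own statement) =====
-- stated objective: simpler
-- what changed: Replaces the 2x2 scenario enumeration with round-tallying by a closed formula over the only two distinct card pairings, each counted twice.
import Mathlib
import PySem

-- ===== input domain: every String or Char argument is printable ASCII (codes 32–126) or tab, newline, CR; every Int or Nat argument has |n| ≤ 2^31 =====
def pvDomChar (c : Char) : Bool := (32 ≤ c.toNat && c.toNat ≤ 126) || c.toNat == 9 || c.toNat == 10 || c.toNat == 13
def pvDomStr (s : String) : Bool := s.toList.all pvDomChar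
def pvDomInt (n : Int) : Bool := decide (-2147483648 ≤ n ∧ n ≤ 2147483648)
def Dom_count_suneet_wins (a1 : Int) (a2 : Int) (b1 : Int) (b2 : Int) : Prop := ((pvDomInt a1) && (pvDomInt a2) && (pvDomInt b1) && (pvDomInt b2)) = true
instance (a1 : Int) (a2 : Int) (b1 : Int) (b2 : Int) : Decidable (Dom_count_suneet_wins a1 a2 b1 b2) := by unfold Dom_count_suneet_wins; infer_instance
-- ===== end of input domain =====

-- ===== PORT A =====
-- B replaces the 2x2 scenario enumeration with a closed formula over the two distinct pairings (simpler).
def count_suneet_wins (a1 : Int) (a2 : Int) (b1 : Int) (b2 : Int) : Int :=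
  [(a1, a2), (a2, a1)].foldl (fun acc s =>
    [(b1, b2), (b2, b1)].foldl (fun acc2 t =>
      let sr0 : Int := 0
      let sl0 : Int := 0
      -- first round: if s1 > sl1 then suneet_rounds_won += 1 elif s1 < sl1 then slavic_rounds_won += 1
      let sr1 := if s.1 > t.1 then sr0 + 1 else sr0
      let sl1 := if s.1 > t.1 then sl0 else if s.1 < t.1 then sl0 + 1 else sl0
      -- second round
      let sr2 := if s.2 > t.2 then sr1 + 1 else sr1
      let sl2 := if s.2 > t.2 then sl1 else if s.2 < t.2 then sl1 + 1 else sl1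
      if sr2 > sl2 then acc2 + 1 else acc2) acc) 0

-- ===== PORT B =====
def pairing_win (x1 : Int) (y1 : Int) (x2 : Int) (y2 : Int) : Int :=
  if ((if x1 > y1 then (1 : Int) else 0) + (if x2 > y2 then (1 : Int) else 0)
      > (if x1 < y1 then (1 : Int) else 0) + (if x2 < y2 then (1 : Int) else 0)) then 1 else 0

def count_suneet_wins_alt (a1 : Int) (a2 : Int) (b1 : Int) (b2 : Int) : Int :=
  2 * pairing_win a1 b1 a2 b2 + 2 * pairing_win a1 b2 a2 b1

-- ===== PRECONDITION & SPEC =====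
def Spec_count_suneet_wins (a1 : Int) (a2 : Int) (b1 : Int) (b2 : Int) (out : Int) : Prop := out = count_suneet_wins_alt a1 a2 b1 b2
instance (a1 : Int) (a2 : Int) (b1 : Int) (b2 : Int) (out : Int) : Decidable (Spec_count_suneet_wins a1 a2 b1 b2 out) := by unfold Spec_count_suneet_wins; infer_instance

-- ===== CLAIM (what is proved, stated in full; the proofs are below) =====
def Claim_equal_count_suneet_wins : Prop := ∀ (a1 : Int) (a2 : Int) (b1 : Int) (b2 : Int), Dom_count_suneet_wins a1 a2 b1 b2 → Spec_count_suneet_wins a1 a2 b1 b2 (count_suneet_wins a1 a2 b1 b2)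

-- ===== LEMMAS AND PROOFS =====

-- ===== VERDICT (by name: the statement is the Claim_ definition above) =====
lemma scen_step (x1 x2 y1 y2 c : Int) :
    (let sr0 : Int := 0
     let sl0 : Int := 0
     let sr1 := if x1 > y1 then sr0 + 1 else sr0
     let sl1 := if x1 > y1 then sl0 else if x1 < y1 then sl0 + 1 else sl0
     let sr2 := if x2 > y2 then sr1 + 1 else sr1
     let sl2 := if x2 > y2 then sl1 else if x2 < y2 then sl1 + 1 else sl1
     if sr2 > sl2 then c + 1 else c) = c + pairing_win x1 y1 x2 y2 := by
  unfold pairing_win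
  dsimp only
  split_ifs <;> omega

lemma pairing_win_swap (x1 y1 x2 y2 : Int) :
    pairing_win x2 y2 x1 y1 = pairing_win x1 y1 x2 y2 := by
  unfold pairing_win
  split_ifs <;> omega

theorem count_suneet_wins_spec : Claim_equal_count_suneet_wins := by
  intro a1 a2 b1 b2 _
  unfold Spec_count_suneet_wins count_suneet_wins count_suneet_wins_alt
  simp only [List.foldl, scen_step, pairing_win_swap]
  ring
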